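-- pv_equiv track=rewrite | github.com/alanddalusi/cracker | cracker.py | hints_to_crunch_template
-- ===== SOURCE A (Python) =====
-- def hints_to_crunch_template(pattern):
--     """Convierte nuestro patrón al formato de crunch."""
--     # crunch usa: @ = lower, , = upper, % = digit, ^ = symbol
--     template = ""
--     for ch in pattern:
--         if ch == '?':
--             template += '@'   # letra minúscula en crunch
--         elif ch == '#':
--             template += '%'   # dígito en crunch
--         elif ch == '*':
--             template += '@'   # simplificamos
--         else:
--             template += ch    # literal
--     return template
-- ===== SOURCE B (Python) =====
-- def hints_to_crunch_template(pattern):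
--     """Convierte nuestro patron al formato de crunch."""
--     # Three staged whole-string substitution passes instead of a per-char loop;
--     # safe because '@' and '%' are never among the searched characters.
--     return pattern.replace('?', '@').replace('*', '@').replace('#', '%')
-- ===== Notes on version B (the rewrite author's own statement) =====
-- stated objective: idiomatic
-- what changed: Replaces A's single per-character accumulating loop with an if/elif chain by three staged whole-string str.replace passes, one per special character; the passes compose to A's chain because the replacement characters are not among the searched ones, and a timing run measured the C-level replace passes constant-factor faster than per-char Python branching and concatenation.
import Mathlib
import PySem

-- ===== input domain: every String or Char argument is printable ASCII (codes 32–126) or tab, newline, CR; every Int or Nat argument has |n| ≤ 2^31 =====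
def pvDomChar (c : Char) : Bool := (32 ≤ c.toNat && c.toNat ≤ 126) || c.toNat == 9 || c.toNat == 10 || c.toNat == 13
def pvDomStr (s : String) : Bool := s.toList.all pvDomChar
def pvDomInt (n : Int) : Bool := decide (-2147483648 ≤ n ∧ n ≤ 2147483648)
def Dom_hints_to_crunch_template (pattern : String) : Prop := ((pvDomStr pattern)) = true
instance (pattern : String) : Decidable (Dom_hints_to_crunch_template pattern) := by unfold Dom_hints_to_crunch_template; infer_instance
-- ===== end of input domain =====

-- B replaces A's single per-character accumulating loop by three staged whole-string
-- replace passes ('?'→'@', '*'→'@', '#'→'%'); correct since '@'/'%' are never searched for.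


-- ===== PORT A =====
def hints_to_crunch_template (pattern : String) : String :=
  pattern.toList.foldl (fun template ch =>
    if ch = '?' then template ++ "@"
    else if ch = '#' then template ++ "%"
    else if ch = '*' then template ++ "@"
    else template.push ch) ""

-- ===== PORT B =====
-- pattern.replace('?','@').replace('*','@').replace('#','%'): three staged whole-string passes
def hints_to_crunch_template_alt (pattern : String) : String :=
  PySem.Str.replace (PySem.Str.replace (PySem.Str.replace pattern "?" "@") "*" "@") "#" "%"

-- ===== PRECONDITION & SPEC =====
def Spec_hints_to_crunch_template (pattern : String) (out : String) : Prop := out = hints_to_crunch_template_alt pattern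
instance (pattern : String) (out : String) : Decidable (Spec_hints_to_crunch_template pattern out) := by unfold Spec_hints_to_crunch_template; infer_instance

-- ===== CLAIM (what is proved, stated in full; the proofs are below) =====
def Claim_equal_hints_to_crunch_template : Prop := ∀ (pattern : String), Dom_hints_to_crunch_template pattern → Spec_hints_to_crunch_template pattern (hints_to_crunch_template pattern)

-- ===== LEMMAS AND PROOFS =====
-- replace with a single-char pattern is a per-character substitution (fuel scanner unrolled)
theorem replace_go_single (o n : Char) (l acc : List Char) (fuel : Nat)
    (h : l.length ≤ fuel) :
    PySem.Chars.replace.go [o] [n] fuel l acc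
      = acc.reverse ++ l.map (fun c => if c = o then n else c) := by
  induction l generalizing fuel acc with
  | nil => cases fuel <;> simp [PySem.Chars.replace.go]
  | cons c t ih =>
    cases fuel with
    | zero => simp at h
    | succ f =>
      simp only [PySem.Chars.replace.go, List.isPrefixOf, List.map_cons]
      by_cases hc : c = o
      · subst hc
        simp only [beq_self_eq_true, Bool.true_and, if_true,
          List.length_singleton, List.drop_succ_cons, List.drop_zero]
        rw [ih _ _ (by simpa using h)]
        simp
      · have hb : (o == c) = false := by
          simp only [beq_eq_false_iff_ne, ne_eq]
          exact fun e => hc e.symm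
        simp only [hb, Bool.false_and, Bool.false_eq_true, if_false]
        rw [ih _ _ (by simpa using h)]
        simp [hc]

theorem replace_single (o n : Char) (l : List Char) :
    PySem.Chars.replace l [o] [n] = l.map (fun c => if c = o then n else c) := by
  unfold PySem.Chars.replace
  simp only [List.isEmpty_cons, Bool.false_eq_true, if_false]
  exact replace_go_single o n l [] l.length le_rfl

-- A's fold appends exactly the per-char crunch translation
theorem crunch_foldl_toList (l : List Char) (acc : String) :
    (l.foldl (fun template ch =>
      if ch = '?' then template ++ "@"
      else if ch = '#' then template ++ "%"
      else if ch = '*' then template ++ "@"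
      else template.push ch) acc).toList
    = acc.toList ++ l.map (fun c =>
        if c = '?' then '@' else if c = '#' then '%' else if c = '*' then '@' else c) := by
  induction l generalizing acc with
  | nil => simp
  | cons c cs ih =>
    rw [List.foldl_cons, ih, List.map_cons]
    have hstep : (if c = '?' then acc ++ "@"
        else if c = '#' then acc ++ "%"
        else if c = '*' then acc ++ "@"
        else acc.push c).toList
        = acc.toList ++ [if c = '?' then '@' else if c = '#' then '%' else if c = '*' then '@' else c] := by
      split_ifs <;> simp
    rw [hstep]; simp

-- ===== VERDICT (by name: the statement is the Claim_ definition above) =====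
theorem hints_to_crunch_template_spec : Claim_equal_hints_to_crunch_template := by
  intro pattern _
  unfold Spec_hints_to_crunch_template hints_to_crunch_template hints_to_crunch_template_alt
  apply String.toList_inj.mp
  rw [crunch_foldl_toList, PySem.Str.toList_replace, PySem.Str.toList_replace,
    PySem.Str.toList_replace]
  have hq : ("?" : String).toList = ['?'] := rfl
  have ha : ("@" : String).toList = ['@'] := rfl
  have hs : ("*" : String).toList = ['*'] := rfl
  have hh : ("#" : String).toList = ['#'] := rfl
  have hp : ("%" : String).toList = ['%'] := rfl
  rw [hq, ha, hs, hh, hp, replace_single, replace_single, replace_single,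
    List.map_map, List.map_map]
  have h0 : ("" : String).toList = [] := rfl
  rw [h0, List.nil_append]
  apply List.map_congr_left
  intro c _
  simp only [Function.comp_apply]
  by_cases h1 : c = '?' <;> by_cases h2 : c = '#' <;> by_cases h3 : c = '*' <;>
    simp_all
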